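-- pv_equiv track=rewrite | github.com/cwayne18/ActivityTracker | py/pl.py | polyline_encode_level
-- ===== SOURCE A (Python) =====
-- def polyline_encode_level(value):
-- 	level_str = [];
-- 	nextValue = 0;
-- 	while (value >= 0x20):
-- 		nextValue = (0x20 | (value & 0x1f)) + 63;
-- 		level_str.append(nextValue);
-- 		value >>= 5;
--
-- 	finalValue = value + 63;
-- 	level_str.append(finalValue);
--
-- 	# Convert each value to its ASCII equivalentlevel_str
-- 	level_str = [chr(l) for l in level_str]
--
-- 	return level_str
-- ===== SOURCE B (Python) =====
-- def polyline_encode_level(value):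
--     # Closed-form indexed extraction: compute the number of 5-bit chunks from
--     # bit_length, then read each chunk directly as (value >> 5*i) & 0x1f
--     # (no sequential destructive shifting of value).
--     if value < 0x20:
--         return [chr(value + 63)]
--     k = (value.bit_length() + 4) // 5          # number of chunks, >= 2 here
--     return [chr((0x20 | ((value >> (5 * i)) & 0x1f)) + 63) for i in range(k - 1)] \
--         + [chr((value >> (5 * (k - 1))) + 63)]
-- ===== Notes on version B (the rewrite author's own statement) =====
-- stated objective: alternative
-- what changed: B computes the number of 5-bit chunks in closed form from value.bit_length() and extracts every chunk directly by indexed shifts (value >> 5*i), instead of A's sequential loop that destructively shifts value and appends chunk by chunk.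
import Mathlib
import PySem

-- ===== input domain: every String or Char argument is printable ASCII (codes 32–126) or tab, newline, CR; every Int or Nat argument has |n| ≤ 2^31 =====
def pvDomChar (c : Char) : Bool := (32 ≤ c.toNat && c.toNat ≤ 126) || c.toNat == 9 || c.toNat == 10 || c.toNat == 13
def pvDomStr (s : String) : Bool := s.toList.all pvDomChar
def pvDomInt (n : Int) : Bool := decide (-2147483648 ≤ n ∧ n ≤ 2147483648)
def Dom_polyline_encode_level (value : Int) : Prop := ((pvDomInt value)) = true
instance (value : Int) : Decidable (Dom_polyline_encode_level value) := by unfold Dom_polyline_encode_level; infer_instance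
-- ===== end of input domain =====

-- B replaces A's destructive shift-and-emit loop by a closed-form chunk count (bit_length)
-- and direct indexed extraction of each 5-bit chunk; objective: alternative decomposition.
-- chr(n) on an in-range nonnegative code (guaranteed by Pre_)
def pvChr (n : Int) : String := String.ofList [Char.ofNat n.toNat]

-- ===== PORT A =====
def pvLoopA (value : Int) (acc : List Int) : List Int :=
  if 32 ≤ value then
    pvLoopA (PySem.Int.floordiv value 32)
      (acc ++ [PySem.Int.bor 32 (PySem.Int.band value 31) + 63])
  else acc ++ [value + 63]
termination_by value.toNat
decreasing_by
  have h2 : PySem.Int.floordiv value 32 = value / 32 :=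
    PySem.Int.floordiv_eq_ediv_of_pos (by omega)
  rw [h2]; omega

def polyline_encode_level (value : Int) : List String :=
  (pvLoopA value []).map pvChr

-- ===== PORT B =====
-- 'value >> (5*i)' is Lean's 'value >>> (5*i)' (exact, per PySem); bit_length is PySem.Int.bitLength
def polyline_encode_level_alt (value : Int) : List String :=
  if value < 32 then [pvChr (value + 63)]
  else
    let k := (PySem.Int.bitLength value + 4) / 5
    ((List.range (k - 1)).map fun i =>
        pvChr (PySem.Int.bor 32 (PySem.Int.band (value >>> (5 * i : Nat)) 31) + 63))
      ++ [pvChr (value >>> (5 * (k - 1) : Nat) + 63)]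

-- ===== PRECONDITION & SPEC =====
-- Pre_ excludes value < -63, exactly where Python's chr(value + 63) raises ValueError (in both A and B).
def Pre_polyline_encode_level (value : Int) : Prop := -63 ≤ value
instance (value : Int) : Decidable (Pre_polyline_encode_level value) := by
  unfold Pre_polyline_encode_level; infer_instance

def pvWitness_polyline_encode_level : Int := (100)

def Spec_polyline_encode_level (value : Int) (out : List String) : Prop := out = polyline_encode_level_alt value
instance (value : Int) (out : List String) : Decidable (Spec_polyline_encode_level value out) := by unfold Spec_polyline_encode_level; infer_instance

-- ===== CLAIM (what is proved, stated in full; the proofs are below) =====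
def Claim_equal_polyline_encode_level : Prop := ∀ (value : Int), Dom_polyline_encode_level value → Pre_polyline_encode_level value → Spec_polyline_encode_level value (polyline_encode_level value)

-- ===== LEMMAS AND PROOFS =====

-- proof-only recursion skeleton (for its induction principle)
def pvRec (v : Int) : Unit :=
  if 32 ≤ v then pvRec (PySem.Int.floordiv v 32) else ()
termination_by v.toNat
decreasing_by
  have h2 : PySem.Int.floordiv v 32 = v / 32 :=
    PySem.Int.floordiv_eq_ediv_of_pos (by omega)
  rw [h2]; omega

theorem pvLoopA_acc (v : Int) (acc : List Int) :
    pvLoopA v acc = acc ++ pvLoopA v [] := by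
  induction v using pvRec.induct generalizing acc with
  | case1 v hv ih =>
    rw [pvLoopA, if_pos hv, ih]
    conv_rhs => rw [pvLoopA]
    rw [if_pos hv, ih ([] ++ [PySem.Int.bor 32 (PySem.Int.band v 31) + 63])]
    simp
  | case2 v hv =>
    rw [pvLoopA, if_neg hv, pvLoopA, if_neg hv]
    simp

-- bitLength is characterized by the enclosing powers of two
theorem pv_bitLen_eq {m k : Nat} (hk : 1 ≤ k) (h1 : 2 ^ (k - 1) ≤ m) (h2 : m < 2 ^ k) :
    PySem.Int.bitLength (m : Int) = k := by
  have hm0 : m ≠ 0 := by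
    have : 1 ≤ 2 ^ (k - 1) := Nat.one_le_two_pow
    omega
  have hub := PySem.Int.lt_two_pow_bitLength (m : Int)
  have hlb := PySem.Int.two_pow_bitLength_le (m : Int) (by exact_mod_cast hm0)
  rw [Int.natAbs_natCast] at hub hlb
  obtain ⟨b, hbdef⟩ : ∃ b, PySem.Int.bitLength (m : Int) = b := ⟨_, rfl⟩
  rw [hbdef] at hub hlb ⊢
  by_contra hne
  rcases Nat.lt_or_ge b k with h | h
  · have : (2:Nat) ^ b ≤ 2 ^ (k - 1) := Nat.pow_le_pow_right (by omega) (by omega)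
    omega
  · have : (2:Nat) ^ k ≤ 2 ^ (b - 1) := Nat.pow_le_pow_right (by omega) (by omega)
    omega

theorem pv_shift0 (m : Int) : m >>> (0 : Nat) = m := by
  cases m <;> rfl

theorem pv_ediv_natCast (n : Nat) : ((n : Int)) / 32 = ((n / 32 : Nat) : Int) :=
  Eq.symm (Nat.ToInt.div_congr rfl rfl)

theorem pv_nat_step (n i : Nat) : n >>> (5 * (i + 1)) = (n / 32) >>> (5 * i) := by
  simp only [Nat.shiftRight_eq_div_pow]
  rw [show 5 * (i + 1) = 5 + 5 * i by ring, pow_add, Nat.div_div_eq_div_mul]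
  norm_num

theorem pv_shift5 (n : Nat) : ((n : Int) >>> (5 : Nat)) = ((n / 32 : Nat) : Int) := by
  rw [← Int.natCast_shiftRight]
  exact congrArg _ (by simp [Nat.shiftRight_eq_div_pow])

theorem pv_shift_step (n i : Nat) :
    ((n : Int) >>> (5 * (i + 1) : Nat)) = (((n / 32 : Nat) : Int) >>> (5 * i : Nat)) := by
  rw [← Int.natCast_shiftRight, ← Int.natCast_shiftRight]
  exact congrArg _ (pv_nat_step n i)

-- the crux: B, on value >= 32, peels off exactly A's first chunk
theorem pv_altStep (v : Int) (hv : 32 <= v) :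
    polyline_encode_level_alt v =
      pvChr (PySem.Int.bor 32 (PySem.Int.band v 31) + 63) ::
        polyline_encode_level_alt (v / 32) := by
  obtain ⟨n, rfl⟩ : ∃ n : Nat, v = (n : Int) := ⟨v.toNat, by omega⟩
  have hn : 32 ≤ n := by exact_mod_cast hv
  have hub := PySem.Int.lt_two_pow_bitLength (n : Int)
  have hlb := PySem.Int.two_pow_bitLength_le (n : Int) (by exact_mod_cast (by omega : n ≠ 0))
  rw [Int.natAbs_natCast] at hub hlb
  obtain ⟨b, hbdef⟩ : ∃ b, PySem.Int.bitLength (n : Int) = b := ⟨_, rfl⟩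
  rw [hbdef] at hub hlb
  have hb6 : 6 ≤ b := by
    by_contra h
    have h32 : (2:Nat) ^ b ≤ 32 := by
      calc (2:Nat) ^ b ≤ 2 ^ 5 := Nat.pow_le_pow_right (by omega) (by omega)
        _ = 32 := by norm_num
    omega
  have hdiv : ((n : Int)) / 32 = ((n / 32 : Nat) : Int) := pv_ediv_natCast n
  -- bitLength of the quotient
  have hbl : PySem.Int.bitLength ((n / 32 : Nat) : Int) = b - 5 := by
    apply pv_bitLen_eq (by omega)
    · have h32 : (2:Nat) ^ (b - 1) = 32 * 2 ^ (b - 6) := by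
        rw [show b - 1 = 5 + (b - 6) by omega, pow_add]; norm_num
      have : 2 ^ (b - 6) ≤ n / 32 := by
        have := Nat.div_le_div_right (c := 32) hlb
        rwa [h32, Nat.mul_div_cancel_left _ (by norm_num)] at this
      simpa [show b - 5 - 1 = b - 6 by omega] using this
    · have h32 : (2:Nat) ^ b = 2 ^ (b - 5) * 32 := by
        rw [show b = (b - 5) + 5 by omega, pow_add]; norm_num
      exact Nat.div_lt_of_lt_mul (by omega)
  rcases Nat.lt_or_ge (n / 32) 32 with hq | hq
  · -- quotient below 32: exactly two chunks, k = 2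
    have hblt : b ≤ 10 := by
      by_contra h
      have h1024 : (1024:Nat) ≤ 2 ^ (b - 1) := by
        calc (1024:Nat) = 2 ^ 10 := by norm_num
          _ ≤ 2 ^ (b - 1) := Nat.pow_le_pow_right (by omega) (by omega)
      omega
    have hk : (b + 4) / 5 = 2 := by omega
    rw [polyline_encode_level_alt, if_neg (by exact_mod_cast (by omega : ¬ (n : Int) < 32)),
        polyline_encode_level_alt, hdiv, if_pos (by exact_mod_cast hq)]
    simp only [hbdef, hk]
    norm_num [List.range_succ, pv_shift0, pv_shift5]
  · -- quotient still >= 32: peel the range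
    have hb11 : 11 ≤ b := by
      by_contra h
      have h1024 : (2:Nat) ^ b ≤ 1024 := by
        calc (2:Nat) ^ b ≤ 2 ^ 10 := Nat.pow_le_pow_right (by omega) (by omega)
          _ = 1024 := by norm_num
      omega
    have hk3 : 3 ≤ (b + 4) / 5 := by omega
    have hk' : (b - 5 + 4) / 5 = (b + 4) / 5 - 1 := by omega
    rw [polyline_encode_level_alt, if_neg (by exact_mod_cast (by omega : ¬ (n : Int) < 32)),
        polyline_encode_level_alt, hdiv, if_neg (by exact_mod_cast (by omega : ¬ ((n / 32 : Nat) : Int) < 32))]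
    simp only [hbdef, hbl, hk']
    rw [show (b + 4) / 5 - 1 = ((b + 4) / 5 - 2) + 1 by omega, List.range_succ_eq_map]
    simp only [List.map_cons, List.map_map, List.cons_append, List.cons.injEq]
    refine ⟨?_, ?_⟩
    · norm_num [pv_shift0]
    · rw [show ((b + 4) / 5 - 2) + 1 - 1 = (b + 4) / 5 - 2 from by omega,
        pv_shift_step n ((b + 4) / 5 - 2)]
      refine congrArg₂ (· ++ ·) ?_ rfl
      apply List.map_congr_left
      intro i _
      simp only [Function.comp_apply]
      rw [show Nat.succ i = i + 1 from rfl, pv_shift_step n i]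

theorem pv_main (v : Int) : (pvLoopA v []).map pvChr = polyline_encode_level_alt v := by
  induction v using pvRec.induct with
  | case1 v hv ih =>
    have hfd : PySem.Int.floordiv v 32 = v / 32 :=
      PySem.Int.floordiv_eq_ediv_of_pos (by omega)
    rw [pvLoopA, if_pos hv, pvLoopA_acc, pv_altStep v hv]
    simp only [List.map_append, List.map_cons, List.map_nil, List.nil_append]
    rw [hfd] at ih
    simp [ih]
  | case2 v hv =>
    rw [pvLoopA, if_neg hv, polyline_encode_level_alt, if_pos (by omega)]
    simp

-- ===== VERDICT (by name: the statement is the Claim_ definition above) =====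
theorem polyline_encode_level_spec : Claim_equal_polyline_encode_level := by
  intro value _ _
  unfold Spec_polyline_encode_level polyline_encode_level
  exact pv_main value
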